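-- pv_equiv track=rewrite | github.com/demitri/paperboy | source/paperboy/ir.py | identify_main_tex
-- ===== SOURCE A (Python) =====
-- from typing import Dict, Optional, Tuple
--
-- def identify_main_tex(latex_files: Dict[str, str]) -> Optional[str]:
--     """Identify the main .tex file from a collection of files.
--
--     Heuristics:
--     1. File with both \\documentclass and \\begin{document}
--     2. Prefer files named main.tex, paper.tex, ms.tex, article.tex
--     3. Fall back to any .tex with \\begin{document}
--     """
--     preferred_names = {"main.tex", "paper.tex", "ms.tex", "article.tex"}
--     candidates = []
--
--     for filename, content in latex_files.items():
--         if not filename.lower().endswith(".tex"):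
--             continue
--
--         has_documentclass = "\\documentclass" in content
--         has_begin_document = "\\begin{document}" in content
--
--         if has_documentclass and has_begin_document:
--             priority = 0
--             basename = filename.lower().split("/")[-1]
--             if basename in preferred_names:
--                 priority = -1
--             candidates.append((priority, filename))
--         elif has_begin_document:
--             candidates.append((1, filename))
--
--     if not candidates:
--         for filename in latex_files:
--             if filename.lower().endswith(".tex"):
--                 return filename
--         return None
--
--     candidates.sort(key=lambda x: x[0])
--     return candidates[0][1]
-- ===== SOURCE B (Python) =====
-- def identify_main_tex(latex_files):
--     """Identify the main .tex file by four ordered early-return passes instead of build-sort-pick."""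
--     preferred_names = {"main.tex", "paper.tex", "ms.tex", "article.tex"}
--     texs = [(f, c) for f, c in latex_files.items() if f.lower().endswith(".tex")]
--     for f, c in texs:
--         if f.lower().split("/")[-1] in preferred_names and "\\documentclass" in c and "\\begin{document}" in c:
--             return f
--     for f, c in texs:
--         if "\\documentclass" in c and "\\begin{document}" in c:
--             return f
--     for f, c in texs:
--         if "\\begin{document}" in c and "\\documentclass" not in c:
--             return f
--     for f, _ in texs:
--         return f
--     return None
-- ===== Notes on version B (the rewrite author's own statement) =====
-- stated objective: simpler
-- what changed: Replaced A's build-a-(priority,filename)-candidate-list-then-stable-sort-and-pick-head with four ordered early-return passes over the .tex files (preferred-name with both markers, both markers, begin-without-documentclass, any .tex), eliminating the candidate tuples and the sort.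
import Mathlib
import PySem

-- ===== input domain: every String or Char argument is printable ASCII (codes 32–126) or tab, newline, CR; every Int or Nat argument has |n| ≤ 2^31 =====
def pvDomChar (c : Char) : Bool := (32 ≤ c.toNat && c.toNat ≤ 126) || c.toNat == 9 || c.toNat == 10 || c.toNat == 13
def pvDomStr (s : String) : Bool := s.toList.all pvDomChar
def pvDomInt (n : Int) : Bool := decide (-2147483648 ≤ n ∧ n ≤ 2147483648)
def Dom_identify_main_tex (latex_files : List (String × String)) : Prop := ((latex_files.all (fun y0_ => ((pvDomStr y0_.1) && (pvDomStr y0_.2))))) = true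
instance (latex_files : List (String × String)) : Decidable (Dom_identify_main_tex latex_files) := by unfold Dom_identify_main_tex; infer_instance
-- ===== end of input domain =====

-- B replaces A's build-candidate-list-then-stable-sort with four ordered early-return
-- passes over the .tex files (simpler; no candidate tuples, no sort).

-- ===== PORT A =====
-- shared elementary predicates (both Pythons contain these very subexpressions)
def pvIsTex (f : String) : Bool := PySem.Str.endswith (PySem.Str.lower f) ".tex"
def pvHasDC (c : String) : Bool := PySem.Str.isIn "\\documentclass" c
def pvHasBD (c : String) : Bool := PySem.Str.isIn "\\begin{document}" c
def pvPreferredNames : PySem.Set String := PySem.Set.ofList ["main.tex", "paper.tex", "ms.tex", "article.tex"]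
-- filename.lower().split("/")[-1]; split? with sep "/" ≠ "" is always `some` of a
-- nonempty list, so the two `getD` defaults are unreachable
def pvBasename (f : String) : String :=
  (PySem.List.pyGet? ((PySem.Str.split? (PySem.Str.lower f) "/").getD []) (-1)).getD ""
def pvIsPref (f : String) : Bool := PySem.Set.contains pvPreferredNames (pvBasename f)

-- one iteration of A's candidate-building loop
def pvCandStep (cands : List (Int × String)) (fc : String × String) : List (Int × String) :=
  if !(pvIsTex fc.1) then cands
  else if pvHasDC fc.2 && pvHasBD fc.2 then
    cands ++ [(if pvIsPref fc.1 then (-1 : Int) else 0, fc.1)]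
  else if pvHasBD fc.2 then cands ++ [((1 : Int), fc.1)]
  else cands

def identify_main_tex (latex_files : List (String × String)) : Option String :=
  let items := (PySem.Dict.ofList latex_files).items
  let candidates := items.foldl pvCandStep []
  if candidates.isEmpty then
    (items.map Prod.fst).find? pvIsTex
  else
    -- candidates.sort(key=lambda x: x[0]); return candidates[0][1]  (nonempty here)
    match PySem.List.pyGet? (PySem.List.sorted candidates (fun x => x.1) false) 0 with
    | some c => some c.2
    | none => none

-- ===== PORT B =====
def identify_main_tex_alt (latex_files : List (String × String)) : Option String :=
  let texs := ((PySem.Dict.ofList latex_files).items).filter (fun fc => pvIsTex fc.1)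
  ((texs.find? (fun fc => pvIsPref fc.1 && pvHasDC fc.2 && pvHasBD fc.2)).or
    ((texs.find? (fun fc => pvHasDC fc.2 && pvHasBD fc.2)).or
      ((texs.find? (fun fc => pvHasBD fc.2 && !(pvHasDC fc.2))).or
        texs.head?))).map Prod.fst

-- ===== PRECONDITION & SPEC =====
def Spec_identify_main_tex (latex_files : List (String × String)) (out : Option String) : Prop := out = identify_main_tex_alt latex_files
instance (latex_files : List (String × String)) (out : Option String) : Decidable (Spec_identify_main_tex latex_files out) := by unfold Spec_identify_main_tex; infer_instance

-- ===== CLAIM (what is proved, stated in full; the proofs are below) =====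
def Claim_equal_identify_main_tex : Prop := ∀ (latex_files : List (String × String)), Dom_identify_main_tex latex_files → Spec_identify_main_tex latex_files (identify_main_tex latex_files)

-- ===== LEMMAS AND PROOFS =====

-- A-side tier predicates on an item (proof-side only)
def pvQ1 (fc : String × String) : Bool := pvIsTex fc.1 && pvHasDC fc.2 && pvHasBD fc.2 && pvIsPref fc.1
def pvQ0 (fc : String × String) : Bool := pvIsTex fc.1 && pvHasDC fc.2 && pvHasBD fc.2 && !(pvIsPref fc.1)
def pvQB (fc : String × String) : Bool := pvIsTex fc.1 && pvHasBD fc.2 && !(pvHasDC fc.2)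

-- what A's loop appends for one item
def pvM (fc : String × String) : List (Int × String) :=
  if !(pvIsTex fc.1) then []
  else if pvHasDC fc.2 && pvHasBD fc.2 then [(if pvIsPref fc.1 then (-1 : Int) else 0, fc.1)]
  else if pvHasBD fc.2 then [((1 : Int), fc.1)]
  else []

theorem pvCandStep_eq (acc : List (Int × String)) (fc : String × String) :
    pvCandStep acc fc = acc ++ pvM fc := by
  unfold pvCandStep pvM; split_ifs <;> simp

theorem pvFoldA (l : List (String × String)) (acc : List (Int × String)) :
    l.foldl pvCandStep acc = acc ++ l.flatMap pvM := by
  induction l generalizing acc with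
  | nil => simp
  | cons a t ih => simp [List.foldl_cons, pvCandStep_eq, ih]

theorem pvM_nil_iff (fc : String × String) :
    pvM fc = [] ↔ (pvIsTex fc.1 && pvHasBD fc.2) = false := by
  unfold pvM
  cases h1 : pvIsTex fc.1 <;> cases h2 : pvHasDC fc.2 <;> cases h3 : pvHasBD fc.2 <;> simp

theorem pvM_mem_key (fc : String × String) (x : Int × String) (hx : x ∈ pvM fc) :
    x.1 = -1 ∨ x.1 = 0 ∨ x.1 = 1 := by
  unfold pvM at hx
  cases h1 : pvIsTex fc.1 <;> cases h2 : pvHasDC fc.2 <;> cases h3 : pvHasBD fc.2 <;>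
    cases h4 : pvIsPref fc.1 <;> simp [h1, h2, h3, h4] at hx <;> simp [hx]

theorem pvM_mem_pred (fc : String × String) (x : Int × String) (hx : x ∈ pvM fc) :
    pvQ1 fc = true ∨ pvQ0 fc = true ∨ pvQB fc = true := by
  unfold pvM at hx
  unfold pvQ1 pvQ0 pvQB
  cases h1 : pvIsTex fc.1 <;> cases h2 : pvHasDC fc.2 <;> cases h3 : pvHasBD fc.2 <;>
    cases h4 : pvIsPref fc.1 <;> simp [h1, h2, h3, h4] at hx ⊢

theorem pvM_find_neg1 (fc : String × String) :
    (pvM fc).find? (fun x => x.1 == -1) = if pvQ1 fc then some ((-1 : Int), fc.1) else none := by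
  unfold pvM pvQ1
  cases h1 : pvIsTex fc.1 <;> cases h2 : pvHasDC fc.2 <;> cases h3 : pvHasBD fc.2 <;>
    cases h4 : pvIsPref fc.1 <;> simp

theorem pvM_find_zero (fc : String × String) :
    (pvM fc).find? (fun x => x.1 == 0) = if pvQ0 fc then some ((0 : Int), fc.1) else none := by
  unfold pvM pvQ0
  cases h1 : pvIsTex fc.1 <;> cases h2 : pvHasDC fc.2 <;> cases h3 : pvHasBD fc.2 <;>
    cases h4 : pvIsPref fc.1 <;> simp

theorem pvM_find_one (fc : String × String) :
    (pvM fc).find? (fun x => x.1 == 1) = if pvQB fc then some ((1 : Int), fc.1) else none := by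
  unfold pvM pvQB
  cases h1 : pvIsTex fc.1 <;> cases h2 : pvHasDC fc.2 <;> cases h3 : pvHasBD fc.2 <;>
    cases h4 : pvIsPref fc.1 <;> simp

theorem pvFind_flatMap (l : List (String × String)) (k : Int)
    (Q : String × String → Bool)
    (h : ∀ fc, (pvM fc).find? (fun x => x.1 == k) = if Q fc then some (k, fc.1) else none) :
    (l.flatMap pvM).find? (fun x => x.1 == k) = (l.find? Q).map (fun fc => (k, fc.1)) := by
  induction l with
  | nil => simp
  | cons a t ih =>
    rw [List.flatMap_cons, List.find?_append, h a, List.find?_cons]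
    cases hq : Q a <;> simp [ih]

theorem pvFind?_ext {α : Type} (l : List α) (p q : α → Bool) (h : ∀ a ∈ l, p a = q a) :
    l.find? p = l.find? q := by
  induction l with
  | nil => rfl
  | cons a t ih =>
    rw [List.find?_cons, List.find?_cons, h a (by simp)]
    cases hq : q a
    · exact ih (fun a ha => h a (by simp [ha]))
    · rfl

theorem pvFind?_eq_head?_filter {α : Type} (l : List α) (p : α → Bool) :
    l.find? p = (l.filter p).head? := by
  induction l with
  | nil => rfl
  | cons a t ih =>
    rw [List.find?_cons, List.filter_cons]
    cases h : p a
    · simpa using ih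
    · simp

theorem pvInsertBy_append_not {α : Type} (bef : α → α → Bool) (x : α) (A B : List α)
    (h : ∀ a ∈ A, bef x a = false) :
    PySem.List.insertBy bef x (A ++ B) = A ++ PySem.List.insertBy bef x B := by
  induction A with
  | nil => simp
  | cons a t ih =>
    rw [List.cons_append, PySem.List.insertBy, h a (by simp)]
    simp [ih (fun a ha => h a (by simp [ha]))]

theorem pvInsertBy_cons_all {α : Type} (bef : α → α → Bool) (x : α) (B : List α)
    (h : ∀ b ∈ B, bef x b = true) :
    PySem.List.insertBy bef x B = x :: B := by
  cases B with
  | nil => rfl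
  | cons b t => rw [PySem.List.insertBy, h b (by simp)]; simp

theorem pvSorted3 (c : List (Int × String)) (h : ∀ x ∈ c, x.1 = -1 ∨ x.1 = 0 ∨ x.1 = 1) :
    PySem.List.sorted c (fun x => x.1) false =
      c.filter (fun x => x.1 == -1) ++ c.filter (fun x => x.1 == 0) ++ c.filter (fun x => x.1 == 1) := by
  induction c using List.reverseRecOn with
  | nil => rfl
  | append_singleton c x ih =>
    rw [PySem.List.sorted_eq_foldl_insertBy, List.foldl_append, List.foldl_cons, List.foldl_nil,
      ← PySem.List.sorted_eq_foldl_insertBy, ih (fun y hy => h y (by simp [hy]))]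
    have hmem1 : ∀ a ∈ c.filter (fun x => x.1 == (-1 : Int)), a.1 = -1 := by
      intro a ha; have := (List.mem_filter.mp ha).2; simpa using this
    have hmem0 : ∀ a ∈ c.filter (fun x => x.1 == (0 : Int)), a.1 = 0 := by
      intro a ha; have := (List.mem_filter.mp ha).2; simpa using this
    have hmemB : ∀ a ∈ c.filter (fun x => x.1 == (1 : Int)), a.1 = 1 := by
      intro a ha; have := (List.mem_filter.mp ha).2; simpa using this
    rcases h x (by simp) with hx | hx | hx
    · rw [List.append_assoc,
        pvInsertBy_append_not _ x _ _ (by intro a ha; simp [hmem1 a ha, hx]),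
        pvInsertBy_cons_all _ x _ (by
          intro b hb
          rcases List.mem_append.mp hb with hb | hb
          · simp [hmem0 b hb, hx]
          · simp [hmemB b hb, hx])]
      simp [List.filter_append, hx]
    · rw [pvInsertBy_append_not _ x _ _ (by
          intro a ha
          rcases List.mem_append.mp ha with ha | ha
          · simp [hmem1 a ha, hx]
          · simp [hmem0 a ha, hx]),
        pvInsertBy_cons_all _ x _ (by intro b hb; simp [hmemB b hb, hx])]
      simp [List.filter_append, hx]
    · rw [PySem.List.insertBy_of_forall_not_before _ x _ (by
          intro a ha
          rcases List.mem_append.mp ha with ha | ha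
          · rcases List.mem_append.mp ha with ha | ha
            · simp [hmem1 a ha, hx]
            · simp [hmem0 a ha, hx]
          · simp [hmemB a ha, hx])]
      simp [List.filter_append, hx]

theorem pvGet0 {α : Type} (xs : List α) : PySem.List.pyGet? xs 0 = xs.head? := by
  have h0 : ((0 : Nat) : Int) = (0 : Int) := rfl
  rw [← h0, PySem.List.pyGet?_natCast]
  cases xs <;> simp

theorem pvCore (l : List (String × String)) :
    (if (l.foldl pvCandStep []).isEmpty then (l.map Prod.fst).find? pvIsTex
     else
       match PySem.List.pyGet? (PySem.List.sorted (l.foldl pvCandStep []) (fun x => x.1) false) 0 with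
       | some c => some c.2
       | none => none) =
    (((l.filter (fun fc => pvIsTex fc.1)).find?
        (fun fc => pvIsPref fc.1 && pvHasDC fc.2 && pvHasBD fc.2)).or
      (((l.filter (fun fc => pvIsTex fc.1)).find? (fun fc => pvHasDC fc.2 && pvHasBD fc.2)).or
        (((l.filter (fun fc => pvIsTex fc.1)).find?
            (fun fc => pvHasBD fc.2 && !(pvHasDC fc.2))).or
          (l.filter (fun fc => pvIsTex fc.1)).head?))).map Prod.fst := by
  have hfold : l.foldl pvCandStep [] = l.flatMap pvM := by simpa using pvFoldA l []
  rw [hfold]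
  by_cases hne : l.flatMap pvM = []
  · rw [hne]
    simp only [List.isEmpty_nil, if_true]
    have hnb : ∀ fc ∈ l, (pvIsTex fc.1 && pvHasBD fc.2) = false := fun fc hfc =>
      (pvM_nil_iff fc).mp (List.flatMap_eq_nil_iff.mp hne fc hfc)
    have h1 : (l.filter (fun fc => pvIsTex fc.1)).find?
        (fun fc => pvIsPref fc.1 && pvHasDC fc.2 && pvHasBD fc.2) = none := by
      rw [List.find?_filter, List.find?_eq_none]
      intro fc hfc
      have := hnb fc hfc
      cases ht : pvIsTex fc.1 <;> cases hb : pvHasBD fc.2 <;> simp_all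
    have h2 : (l.filter (fun fc => pvIsTex fc.1)).find?
        (fun fc => pvHasDC fc.2 && pvHasBD fc.2) = none := by
      rw [List.find?_filter, List.find?_eq_none]
      intro fc hfc
      have := hnb fc hfc
      cases ht : pvIsTex fc.1 <;> cases hb : pvHasBD fc.2 <;> simp_all
    have h3 : (l.filter (fun fc => pvIsTex fc.1)).find?
        (fun fc => pvHasBD fc.2 && !(pvHasDC fc.2)) = none := by
      rw [List.find?_filter, List.find?_eq_none]
      intro fc hfc
      have := hnb fc hfc
      cases ht : pvIsTex fc.1 <;> cases hb : pvHasBD fc.2 <;> simp_all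
    rw [h1, h2, h3]
    simp only [Option.none_or]
    rw [List.find?_map, ← pvFind?_eq_head?_filter,
      pvFind?_ext l (pvIsTex ∘ Prod.fst) (fun fc => pvIsTex fc.1) (fun a _ => rfl)]
  · rw [if_neg (by simpa [List.isEmpty_iff] using hne)]
    have hkeys : ∀ x ∈ l.flatMap pvM, x.1 = -1 ∨ x.1 = 0 ∨ x.1 = 1 := by
      intro x hx
      obtain ⟨fc, hfc, hm⟩ := List.mem_flatMap.mp hx
      exact pvM_mem_key fc x hm
    rw [pvSorted3 _ hkeys, pvGet0, List.head?_append, List.head?_append,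
      ← pvFind?_eq_head?_filter, ← pvFind?_eq_head?_filter, ← pvFind?_eq_head?_filter,
      pvFind_flatMap l (-1) pvQ1 pvM_find_neg1, pvFind_flatMap l 0 pvQ0 pvM_find_zero,
      pvFind_flatMap l 1 pvQB pvM_find_one]
    have hB1 : (l.filter (fun fc => pvIsTex fc.1)).find?
        (fun fc => pvIsPref fc.1 && pvHasDC fc.2 && pvHasBD fc.2) = l.find? pvQ1 := by
      rw [List.find?_filter]
      apply pvFind?_ext
      intro a _
      unfold pvQ1
      cases h1 : pvIsTex a.1 <;> cases h2 : pvHasDC a.2 <;> cases h3 : pvHasBD a.2 <;>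
        cases h4 : pvIsPref a.1 <;> simp
    have hB2 : (l.filter (fun fc => pvIsTex fc.1)).find?
        (fun fc => pvHasDC fc.2 && pvHasBD fc.2) =
        l.find? (fun fc => pvIsTex fc.1 && (pvHasDC fc.2 && pvHasBD fc.2)) := by
      rw [List.find?_filter]
      apply pvFind?_ext
      intro a _
      cases h1 : pvIsTex a.1 <;> cases h2 : pvHasDC a.2 <;> cases h3 : pvHasBD a.2 <;> simp
    have hB3 : (l.filter (fun fc => pvIsTex fc.1)).find?
        (fun fc => pvHasBD fc.2 && !(pvHasDC fc.2)) = l.find? pvQB := by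
      rw [List.find?_filter]
      apply pvFind?_ext
      intro a _
      unfold pvQB
      cases h1 : pvIsTex a.1 <;> cases h2 : pvHasDC a.2 <;> cases h3 : pvHasBD a.2 <;> simp
    rw [hB1, hB2, hB3, ← pvFind?_eq_head?_filter]
    cases hf1 : l.find? pvQ1 with
    | some fc => simp
    | none =>
      have hq1 : ∀ fc ∈ l, pvQ1 fc = false := by
        intro fc hfc
        have := List.find?_eq_none.mp hf1 fc hfc
        simpa using this
      have h20 : l.find? (fun fc => pvIsTex fc.1 && (pvHasDC fc.2 && pvHasBD fc.2)) =
          l.find? pvQ0 := by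
        apply pvFind?_ext
        intro a ha
        have := hq1 a ha
        unfold pvQ1 at this
        unfold pvQ0
        cases h1 : pvIsTex a.1 <;> cases h2 : pvHasDC a.2 <;> cases h3 : pvHasBD a.2 <;>
          cases h4 : pvIsPref a.1 <;> simp_all
      rw [h20]
      cases hf0 : l.find? pvQ0 with
      | some fc => simp
      | none =>
        cases hfb : l.find? pvQB with
        | some fc => simp
        | none =>
          exfalso
          obtain ⟨x, hx⟩ := List.exists_mem_of_ne_nil _ hne
          obtain ⟨fc, hfc, hm⟩ := List.mem_flatMap.mp hx
          rcases pvM_mem_pred fc x hm with h | h | h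
          · exact absurd h (by simpa using List.find?_eq_none.mp hf1 fc hfc)
          · exact absurd h (by simpa using List.find?_eq_none.mp hf0 fc hfc)
          · exact absurd h (by simpa using List.find?_eq_none.mp hfb fc hfc)

-- ===== VERDICT (by name: the statement is the Claim_ definition above) =====
theorem identify_main_tex_spec : Claim_equal_identify_main_tex := by
  intro lf _
  unfold Spec_identify_main_tex identify_main_tex identify_main_tex_alt
  exact pvCore ((PySem.Dict.ofList lf).items)
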